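-- pv_equiv track=rewrite | github.com/MetaNovitia/codingsessions | public/topics/Winter 2019/DFS.py | dfs
-- ===== SOURCE A (Python) =====
-- def dfs(adjList, source, visited, path):
--
--     cycle = None
--
--     for node in adjList[source]:
--
--         path.append(node)
--
--         # if equal to origin, return the cycle
--         if node == path[0]: return path
--
--         # else if the node is unvisited, dfs on it
--         elif not visited[node]:
--
--             visited[node] = True
--             cycle = dfs(adjList, node, visited, path)
--
--             # if there's no cycle, continue searching
--             if cycle != None: return cycle
--
--         path.pop()
--
--     return cycle
-- ===== SOURCE B (Python) =====
-- def dfs(adjList, source, visited, path):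
--     # Iterative DFS with an explicit stack of (node, next-neighbor-index) frames,
--     # replacing A's recursion; mutates `visited` and `path` exactly like A and
--     # performs the same adjList[node] / visited[nxt] lookups in the same order,
--     # so it also raises KeyError exactly where A does.
--     stack = [(source, 0)]
--     while stack:
--         node, i = stack[-1]
--         neigh = adjList[node]
--         if i < len(neigh):
--             stack[-1] = (node, i + 1)
--             nxt = neigh[i]
--             path.append(nxt)
--             if nxt == path[0]:
--                 return path
--             if not visited[nxt]:
--                 visited[nxt] = True
--                 stack.append((nxt, 0))
--             else:
--                 path.pop()
--         else:
--             stack.pop()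
--             if stack:
--                 path.pop()
--     return None
-- ===== Notes on version B (the rewrite author's own statement) =====
-- stated objective: alternative
-- what changed: A's recursive DFS is replaced by an iterative explicit-stack machine whose frames hold (node, next-neighbor-index), with the same visited/path mutation discipline, the same lookups in the same order (so B raises KeyError exactly where A does) and the same return value wherever A returns.
-- outside the precondition, e.g. on dfs({0: [1, 9], 1: [2]}, 0, {1: False, 2: False}, [2]): A returns [2, 1, 2], B returns [2, 1, 2]
import Mathlib
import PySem

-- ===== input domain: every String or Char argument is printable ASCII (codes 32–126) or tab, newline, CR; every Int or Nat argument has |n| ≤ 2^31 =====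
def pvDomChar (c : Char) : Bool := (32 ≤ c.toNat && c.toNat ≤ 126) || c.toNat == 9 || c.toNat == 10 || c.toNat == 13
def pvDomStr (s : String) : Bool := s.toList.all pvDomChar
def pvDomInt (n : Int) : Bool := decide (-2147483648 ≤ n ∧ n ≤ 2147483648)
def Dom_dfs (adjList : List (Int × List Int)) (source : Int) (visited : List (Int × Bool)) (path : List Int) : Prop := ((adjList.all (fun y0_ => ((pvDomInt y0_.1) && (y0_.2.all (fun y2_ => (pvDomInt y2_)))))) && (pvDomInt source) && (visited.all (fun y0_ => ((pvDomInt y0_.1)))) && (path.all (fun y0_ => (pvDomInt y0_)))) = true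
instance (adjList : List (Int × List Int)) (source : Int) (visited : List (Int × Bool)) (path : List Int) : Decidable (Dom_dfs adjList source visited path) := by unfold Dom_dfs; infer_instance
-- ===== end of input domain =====

-- B replaces A's recursive cycle-search DFS by an iterative explicit-stack machine with
-- (node, next-neighbor-index) frames (same cost class); in Python both mutate `visited`/`path`
-- identically and raise KeyError at the same lookup — the equivalence proved here is about the return value.


-- number of keys still mapped to False in `visited` (recursion/loop measure for both ports)
def pvCf (v : PySem.Dict Int Bool) : Nat := v.items.countP (fun kv => kv.2 == false)

-- Marking a key that currently reads False as True strictly shrinks the count of False entries.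
-- (Both ports' termination needs this, so it stays above the claim block; the ports cite it.)
theorem pvCf_countP_map_le (k : Int) (l : List (Int × Bool)) :
    (l.map (fun p => if p.1 == k then (k, true) else p)).countP (fun kv => kv.2 == false) ≤
      l.countP (fun kv => kv.2 == false) := by
  rw [List.countP_map]
  apply List.countP_mono_left
  intro a _ h
  by_cases h1 : a.1 = k
  · simp [h1] at h
  · simpa [h1] using h

theorem pvCf_countP_map_lt (k : Int) (l : List (Int × Bool)) (hmem : (k, false) ∈ l) :
    (l.map (fun p => if p.1 == k then (k, true) else p)).countP (fun kv => kv.2 == false) <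
      l.countP (fun kv => kv.2 == false) := by
  induction l with
  | nil => cases hmem
  | cons x xs ih =>
    simp only [List.map_cons, List.countP_cons]
    rcases List.mem_cons.mp hmem with hx | hx
    · have hle := pvCf_countP_map_le k xs
      subst hx
      simp at hle ⊢
      omega
    · have hlt := ih hx
      by_cases hx1 : x.1 = k
      · simp [hx1] at hlt ⊢; omega
      · simp [hx1] at hlt ⊢; omega

theorem pvCf_insert_lt (v : PySem.Dict Int Bool) (k : Int)
    (h : v.getD k true = false) : pvCf (v.insert k true) < pvCf v := by
  have hget : v.get? k = some false := by
    rcases hg : v.get? k with _ | b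
    · rw [PySem.Dict.getD_eq_get?_getD, hg] at h; simp at h
    · cases b
      · rfl
      · rw [PySem.Dict.getD_eq_get?_getD, hg] at h; simp at h
  have hc : v.contains k = true := by
    rw [PySem.Dict.contains_eq_isSome_get?, hget]; rfl
  have hmem : (k, false) ∈ v.items := PySem.Dict.mem_items_of_get?_eq_some v hget
  rw [pvCf, pvCf, PySem.Dict.items_insert_of_contains v true hc]
  exact pvCf_countP_map_lt k v.items hmem

-- ===== PORT A =====
-- A is recursive and works by mutation; the port threads the (visited, path) state and uses fuel
-- for the recursion depth (`none` = fuel ran out; fuel pvCf+1 is proved sufficient below).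
mutual
-- one call of Python's `dfs`: look up adjList[source] and run the for-loop on it
def dfsGoA (fuel : Nat) (adjList : List (Int × List Int)) (source : Int)
    (visited : PySem.Dict Int Bool) (path : List Int) :
    Option (Option (List Int) × PySem.Dict Int Bool × List Int) :=
  match fuel with
  | 0 => none
  | f + 1 =>
    -- adjList[source]; a missing key (Python KeyError) is excluded by Pre_dfs
    dfsLoopA f adjList ((PySem.Dict.mk adjList).getD source []) visited path
termination_by (fuel, 0)

-- the `for node in adjList[source]` loop; `cycle` is None whenever the loop continues
def dfsLoopA (fuel : Nat) (adjList : List (Int × List Int)) (nodes : List Int)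
    (visited : PySem.Dict Int Bool) (path : List Int) :
    Option (Option (List Int) × PySem.Dict Int Bool × List Int) :=
  match nodes with
  | [] => some (none, visited, path)                       -- loop ends: return cycle (= None)
  | node :: rest =>
    -- path.append(node), then: if node == path[0]: return path
    if PySem.List.pyGet? (path ++ [node]) 0 = some node then
      some (some (path ++ [node]), visited, path ++ [node])
    else if visited.getD node true = false then            -- elif not visited[node] (missing key excluded by Pre_dfs)
      match dfsGoA fuel adjList node (visited.insert node true) (path ++ [node]) with
      | none => none
      | some (some c, v', p') => some (some c, v', p')     -- if cycle != None: return cycle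
      | some (none, v', p') => dfsLoopA fuel adjList rest v' p'.dropLast  -- path.pop(); next neighbor
    else
      dfsLoopA fuel adjList rest visited (path ++ [node]).dropLast  -- path.pop(); next neighbor
termination_by (fuel, nodes.length + 1)
end

def dfs (adjList : List (Int × List Int)) (source : Int) (visited : List (Int × Bool)) (path : List Int) : Option (List Int) :=
  -- fuel pvCf+1 never runs out (dfsGoA_returns below), so the `none => none` arm is unreachable
  match dfsGoA (pvCf (PySem.Dict.mk visited) + 1) adjList source (PySem.Dict.mk visited) path with
  | some (r, _, _) => r
  | none => none

-- ===== PORT B =====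
-- the `while stack:` loop of Source B; a frame (node, i) holds the next index i into adjList[node]
def dfsMach (adjList : List (Int × List Int)) (stack : List (Int × Nat))
    (visited : PySem.Dict Int Bool) (path : List Int) : Option (List Int) :=
  match stack with
  | [] => none                                             -- while exits: return None
  | (node, i) :: rest =>
    -- neigh = adjList[node] (missing key excluded by Pre_dfs)
    if h : i < ((PySem.Dict.mk adjList).getD node []).length then
      -- stack[-1] = (node, i+1); nxt = neigh[i]; path.append(nxt)
      -- if nxt == path[0]: return path
      if PySem.List.pyGet? (path ++ [((PySem.Dict.mk adjList).getD node [])[i]]) 0 =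
          some ((PySem.Dict.mk adjList).getD node [])[i] then
        some (path ++ [((PySem.Dict.mk adjList).getD node [])[i]])
      else if visited.getD ((PySem.Dict.mk adjList).getD node [])[i] true = false then
        -- if not visited[nxt]: visited[nxt] = True; push the frame (nxt, 0)
        dfsMach adjList ((((PySem.Dict.mk adjList).getD node [])[i], 0) :: (node, i + 1) :: rest)
          (visited.insert ((PySem.Dict.mk adjList).getD node [])[i] true)
          (path ++ [((PySem.Dict.mk adjList).getD node [])[i]])
      else
        -- else: path.pop()
        dfsMach adjList ((node, i + 1) :: rest) visited (path ++ [((PySem.Dict.mk adjList).getD node [])[i]]).dropLast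
    else
      match rest with                                      -- stack.pop()
      | [] => none                                         -- stack now empty: loop exits, return None
      | hd :: tl => dfsMach adjList (hd :: tl) visited path.dropLast  -- if stack: path.pop()
termination_by
  (pvCf visited, (stack.map (fun f => ((PySem.Dict.mk adjList).getD f.1 []).length - f.2 + 1)).sum)
decreasing_by
  · exact Prod.Lex.left _ _ (pvCf_insert_lt _ _ (by assumption))
  · apply Prod.Lex.right; simp only [List.map_cons, List.sum_cons]; omega
  · apply Prod.Lex.right; simp only [List.map_cons, List.sum_cons]; omega

def dfs_alt (adjList : List (Int × List Int)) (source : Int) (visited : List (Int × Bool)) (path : List Int) : Option (List Int) :=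
  dfsMach adjList [(source, 0)] (PySem.Dict.mk visited) path

-- ===== PRECONDITION & SPEC =====
-- the neighbors of m that the search can visit before hitting the cycle-closing node h = path[0]
def pvPreNbrs (adjList : List (Int × List Int)) (h : Int) (m : Int) : List Int :=
  ((PySem.Dict.mk adjList).getD m []).takeWhile (fun n => n ≠ h)

-- one expansion step of the set of nodes the search can recurse into (initially-unvisited
-- pre-h neighbors of current members)
def pvPreStep (adjList : List (Int × List Int)) (visited : List (Int × Bool)) (h : Int)
    (s : List Int) : List Int :=
  s.foldl (fun acc m =>
    (pvPreNbrs adjList h m).foldl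
      (fun acc2 n =>
        if (PySem.Dict.mk visited).getD n true = false then PySem.Set.add acc2 n else acc2)
      acc) s

-- iterate the step to its fixpoint (the step is inflationary and bounded by the finitely many
-- listed neighbors, so (total neighbor count)+1 rounds reach it)
def pvPreReach (adjList : List (Int × List Int)) (visited : List (Int × Bool)) (h : Int) :
    Nat → List Int → List Int
  | 0, s => s
  | f + 1, s => pvPreReach adjList visited h f (pvPreStep adjList visited h s)

-- Pre_dfs restricts the claim to well-keyed graph encodings -- the function's natural domain:
-- source is a key of adjList and, when path is nonempty with head h, every node the search can
-- recurse into (graph reachability through initially-unvisited neighbors listed before h) is a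
-- key of adjList with its pre-h neighbors keys of visited. Outside Pre_dfs both A and B raise
-- KeyError at the same lookup, except on malformed encodings where a cycle closes before the
-- first missing key is touched: there A and B still return the identical value, since B repeats
-- A's lookups in A's order (the claim's cites give two such inputs).
def Pre_dfs (adjList : List (Int × List Int)) (source : Int) (visited : List (Int × Bool)) (path : List Int) : Prop :=
  (PySem.Dict.mk adjList).contains source = true ∧
  ∀ h ∈ path.take 1,
    ∀ m ∈ pvPreReach adjList visited h ((adjList.map (fun pr => pr.2.length)).sum + 1) [source],
      (PySem.Dict.mk adjList).contains m = true ∧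
      ∀ n ∈ pvPreNbrs adjList h m, (PySem.Dict.mk visited).contains n = true
instance (adjList : List (Int × List Int)) (source : Int) (visited : List (Int × Bool)) (path : List Int) : Decidable (Pre_dfs adjList source visited path) := by unfold Pre_dfs; infer_instance

def pvWitness_dfs : (List (Int × List Int)) × Int × (List (Int × Bool)) × List Int :=
  ([(0, [1]), (1, [0])], 0, [(0, true), (1, false)], [])

def Spec_dfs (adjList : List (Int × List Int)) (source : Int) (visited : List (Int × Bool)) (path : List Int) (out : Option (List Int)) : Prop := out = dfs_alt adjList source visited path
instance (adjList : List (Int × List Int)) (source : Int) (visited : List (Int × Bool)) (path : List Int) (out : Option (List Int)) : Decidable (Spec_dfs adjList source visited path out) := by unfold Spec_dfs; infer_instance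

-- ===== CLAIM (what is proved, stated in full; the proofs are below) =====
def Claim_equal_dfs : Prop := ∀ (adjList : List (Int × List Int)) (source : Int) (visited : List (Int × Bool)) (path : List Int), Dom_dfs adjList source visited path → Pre_dfs adjList source visited path → Spec_dfs adjList source visited path (dfs adjList source visited path)

-- ===== LEMMAS AND PROOFS =====

-- Fuel sufficiency + invariants of the A-side loop: with pvCf visited ≤ fuel the loop returns
-- `some`, never increases pvCf, and restores `path` whenever it reports no cycle.
theorem dfsLoopA_returns (adjList : List (Int × List Int)) :
    ∀ (fuel : Nat) (nodes : List Int) (v : PySem.Dict Int Bool) (p : List Int),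
      pvCf v ≤ fuel →
      ∃ r v' p', dfsLoopA fuel adjList nodes v p = some (r, v', p') ∧
        pvCf v' ≤ pvCf v ∧ (r = none → p' = p) := by
  intro fuel
  induction fuel using Nat.strong_induction_on with
  | _ fuel ihf =>
    intro nodes
    induction nodes with
    | nil => intro v p hf; exact ⟨none, v, p, by rw [dfsLoopA], le_refl _, fun _ => rfl⟩
    | cons node rest ihn =>
      intro v p hf
      rw [dfsLoopA]
      by_cases h0 : PySem.List.pyGet? (p ++ [node]) 0 = some node
      · rw [if_pos h0]
        exact ⟨some (p ++ [node]), v, p ++ [node], rfl, le_refl _, by simp⟩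
      · rw [if_neg h0]
        by_cases hv : v.getD node true = false
        · rw [if_pos hv]
          have hlt : pvCf (v.insert node true) < pvCf v := pvCf_insert_lt v node hv
          obtain ⟨f, rfl⟩ : ∃ f, fuel = f + 1 := ⟨fuel - 1, by omega⟩
          · rw [dfsGoA]
            obtain ⟨rc, vc, pc, hrun, hcf, hres⟩ :=
              ihf f (by omega) ((PySem.Dict.mk adjList).getD node [])
                (v.insert node true) (p ++ [node]) (by omega)
            rw [hrun]
            match rc, hres with
            | some c, _ => exact ⟨some c, vc, pc, rfl, by omega, by simp⟩
            | none, hres =>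
              obtain ⟨r, v', p', hrun2, hcf2, hres2⟩ := ihn vc pc.dropLast (by omega)
              refine ⟨r, v', p', hrun2, by omega, fun hr => ?_⟩
              rw [hres2 hr, hres rfl, List.dropLast_concat]
        · rw [if_neg hv]
          obtain ⟨r, v', p', hrun2, hcf2, hres2⟩ := ihn v (p ++ [node]).dropLast hf
          refine ⟨r, v', p', hrun2, hcf2, fun hr => ?_⟩
          rw [hres2 hr, List.dropLast_concat]

theorem dfsGoA_returns (adjList : List (Int × List Int)) (fuel : Nat) (s : Int)
    (v : PySem.Dict Int Bool) (p : List Int) (hf : pvCf v < fuel) :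
    ∃ r v' p', dfsGoA fuel adjList s v p = some (r, v', p') ∧
      pvCf v' ≤ pvCf v ∧ (r = none → p' = p) := by
  obtain ⟨f, rfl⟩ : ∃ f, fuel = f + 1 := ⟨fuel - 1, by omega⟩
  rw [dfsGoA]
  exact dfsLoopA_returns adjList f ((PySem.Dict.mk adjList).getD s []) v p (by omega)

-- Bridge: the machine run from a frame (n, i) computes exactly what A's loop computes on the
-- remaining neighbors drop i adjList[n], then continues with the rest of the stack.
theorem dfsMach_bridge (adjList : List (Int × List Int)) :
    ∀ (c : Nat) (v : PySem.Dict Int Bool), pvCf v = c →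
    ∀ (rem : Nat) (n : Int) (i : Nat), ((PySem.Dict.mk adjList).getD n []).length - i = rem →
    ∀ (S : List (Int × Nat)) (p : List Int) (fuel : Nat), pvCf v ≤ fuel →
    ∀ (r : Option (List Int)) (v' : PySem.Dict Int Bool) (p' : List Int),
      dfsLoopA fuel adjList (((PySem.Dict.mk adjList).getD n []).drop i) v p = some (r, v', p') →
      dfsMach adjList ((n, i) :: S) v p =
        match r with
        | some c => some c
        | none => match S with
          | [] => none
          | _ :: _ => dfsMach adjList S v' p.dropLast := by
  intro c
  induction c using Nat.strong_induction_on with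
  | _ c ihc =>
    intro v hvc rem
    induction rem using Nat.strong_induction_on with
    | _ rem ihr =>
      intro n i hrem S p fuel hfuel r v' p' hrun
      rw [dfsMach.eq_def]
      dsimp only
      by_cases hi : i < ((PySem.Dict.mk adjList).getD n []).length
      · rw [List.drop_eq_getElem_cons hi, dfsLoopA] at hrun
        rw [dif_pos hi]
        by_cases h0 : PySem.List.pyGet? (p ++ [((PySem.Dict.mk adjList).getD n [])[i]]) 0 =
            some ((PySem.Dict.mk adjList).getD n [])[i]
        · rw [if_pos h0] at hrun ⊢
          injection hrun with hrun
          rw [Prod.mk.injEq, Prod.mk.injEq] at hrun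
          obtain ⟨h1, h2, h3⟩ := hrun
          subst h1
          rfl
        · rw [if_neg h0] at hrun ⊢
          by_cases hv : v.getD ((PySem.Dict.mk adjList).getD n [])[i] true = false
          · rw [if_pos hv] at hrun ⊢
            have hlt := pvCf_insert_lt v _ hv
            obtain ⟨f, rfl⟩ : ∃ f, fuel = f + 1 := ⟨fuel - 1, by omega⟩
            rw [dfsGoA] at hrun
            obtain ⟨rc, vc, pc, hcrun, hccf, hcres⟩ :=
              dfsLoopA_returns adjList f ((PySem.Dict.mk adjList).getD ((PySem.Dict.mk adjList).getD n [])[i] [])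
                (v.insert ((PySem.Dict.mk adjList).getD n [])[i] true)
                (p ++ [((PySem.Dict.mk adjList).getD n [])[i]]) (by omega)
            rw [hcrun] at hrun
            -- IH for the pushed frame (nxt, 0): pvCf dropped strictly
            have hbr := ihc (pvCf (v.insert ((PySem.Dict.mk adjList).getD n [])[i] true)) (by omega)
              (v.insert ((PySem.Dict.mk adjList).getD n [])[i] true) rfl
              (((PySem.Dict.mk adjList).getD ((PySem.Dict.mk adjList).getD n [])[i] []).length)
              ((PySem.Dict.mk adjList).getD n [])[i] 0 (by omega)
              ((n, i + 1) :: S) (p ++ [((PySem.Dict.mk adjList).getD n [])[i]]) f (by omega)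
              rc vc pc (by simpa using hcrun)
            rw [hbr]
            match rc, hcres with
            | some cc, _ =>
              dsimp only
              dsimp only at hrun
              injection hrun with hrun
              rw [Prod.mk.injEq, Prod.mk.injEq] at hrun
              obtain ⟨h1, h2, h3⟩ := hrun
              subst h1
              rfl
            | none, hcres =>
              have hpc : pc = p ++ [((PySem.Dict.mk adjList).getD n [])[i]] := hcres rfl
              subst hpc
              dsimp only
              dsimp only at hrun
              rw [List.dropLast_concat] at hrun ⊢
              -- continue the parent frame at i+1 with the returned visited vc (pvCf vc < pvCf v)
              exact ihc (pvCf vc) (by omega) vc rfl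
                (((PySem.Dict.mk adjList).getD n []).length - (i + 1)) n (i + 1) rfl
                S p (f + 1) (by omega) r v' p' hrun
          · rw [if_neg hv] at hrun ⊢
            rw [List.dropLast_concat] at hrun ⊢
            exact ihr (((PySem.Dict.mk adjList).getD n []).length - (i + 1)) (by omega)
              n (i + 1) rfl S p fuel hfuel r v' p' hrun
      · rw [List.drop_eq_nil_of_le (by omega), dfsLoopA] at hrun
        injection hrun with hrun
        rw [Prod.mk.injEq, Prod.mk.injEq] at hrun
        obtain ⟨h1, h2, h3⟩ := hrun
        subst h1
        subst h2
        rw [dif_neg hi]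
        match S with
        | [] => rfl
        | _ :: _ => rfl

-- ===== VERDICT (by name: the statements are the Claim_ definitions above) =====
theorem dfs_spec : Claim_equal_dfs := by
  intro adjList source visited path _ _
  unfold Spec_dfs dfs dfs_alt
  obtain ⟨r, v', p', hrun, -, -⟩ :=
    dfsGoA_returns adjList (pvCf (PySem.Dict.mk visited) + 1) source
      (PySem.Dict.mk visited) path (by omega)
  rw [hrun]
  rw [dfsGoA] at hrun
  have hbr := dfsMach_bridge adjList (pvCf (PySem.Dict.mk visited)) (PySem.Dict.mk visited) rfl
    (((PySem.Dict.mk adjList).getD source []).length) source 0 (by omega)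
    [] path (pvCf (PySem.Dict.mk visited)) (le_refl _) r v' p' (by simpa using hrun)
  rw [hbr]
  match r with
  | some c => rfl
  | none => rfl
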